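-- pv_equiv track=rewrite | github.com/Elahe-khayatian/k-RF-measures | functions.py | getkRFmeasure_unrooted
-- ===== SOURCE A (Python) =====
-- def getkRFmeasure_unrooted(P_Total):
--  d_Total=[]
--  for i in range(len(P_Total)):
--   d=[]
--   P_Supp=[]
--   for p in P_Total[i]:
--     if p not in P_Supp and [p[1],p[0]] not in P_Supp:
--        P_Supp.append(p)
--   for j in range(len(P_Total)):
--      d_k=len(P_Total[i])+len(P_Total[j])
--      for p in P_Supp:
--        if P_Total[i].count(p)+P_Total[i].count([p[1], p[0]])> (P_Total[j].count(p)+ P_Total[j].count([p[1],p[0]])):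
--         d_k=d_k-2*(P_Total[j].count(p)+P_Total[j].count([p[1],p[0]]))
--        else:
--         d_k=d_k-2*(P_Total[i].count(p)+P_Total[i].count([p[1], p[0]]))
--      d.append(d_k)
--   d_Total.append(d)
--  return(d_Total)
-- ===== SOURCE B (Python) =====
-- def getkRFmeasure_unrooted(P_Total):
--     n = len(P_Total)
--     # One global inverted index: every occurrence (element, list-index), grouped by element
--     # into postings lists.  No per-pair count scans and no pairwise min: each support
--     # element updates the whole row at once via the identity a + b - |a - b| == 2*min(a, b).
--     occ = [(tuple(p), j) for j, P in enumerate(P_Total) for p in P]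
--     postings = {}
--     for key, j in occ:
--         postings.setdefault(key, []).append(j)
--
--     D = []
--     for i, P in enumerate(P_Total):
--         row = [len(P) + len(Q) for Q in P_Total]
--         kept = set()
--         for p in P:
--             t = tuple(p)
--             s = (p[1], p[0])
--             if t in kept or s in kept:
--                 continue
--             kept.add(t)
--             c = {}
--             for j in postings[t] + postings.get(s, []):
--                 c[j] = c.get(j, 0) + 1
--             a = c.get(i, 0)
--             row = [r - (a + c.get(j, 0) - abs(a - c.get(j, 0)))
--                    for j, r in enumerate(row)]
--         D.append(row)
--     return D
-- ===== Notes on version B (the rewrite author's own statement) =====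
-- stated objective: faster
-- what changed: Instead of A's nested per-pair (i,j) scans that re-run four list.count passes for every support element, B builds one global inverted index mapping each element to the postings list of tree indices where it occurs, and for each support element of list i updates the entire distance-matrix row at once, replacing the comparison/branch on counts by the identity a+b-|a-b| = 2*min(a,b); there is no pairwise count scan and no min/branch left.
import Mathlib
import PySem

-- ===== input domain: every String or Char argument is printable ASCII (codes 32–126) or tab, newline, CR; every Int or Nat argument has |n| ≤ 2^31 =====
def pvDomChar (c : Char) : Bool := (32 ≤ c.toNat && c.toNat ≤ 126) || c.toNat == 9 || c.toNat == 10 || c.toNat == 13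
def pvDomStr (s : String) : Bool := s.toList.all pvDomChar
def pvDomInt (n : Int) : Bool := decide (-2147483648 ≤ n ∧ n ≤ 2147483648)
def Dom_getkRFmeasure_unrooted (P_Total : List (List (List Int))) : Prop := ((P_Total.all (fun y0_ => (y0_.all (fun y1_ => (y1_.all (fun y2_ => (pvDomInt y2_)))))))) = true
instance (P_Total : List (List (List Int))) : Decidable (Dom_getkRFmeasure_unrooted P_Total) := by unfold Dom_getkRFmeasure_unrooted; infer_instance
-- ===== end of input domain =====

-- B replaces A's per-pair nested count scans by one global inverted index (element -> postings
-- of list indices) built in a single pass, and updates a whole row per support element using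
-- a+b-|a-b| = 2*min(a,b); return-value equivalence only (neither mutates its argument).

-- [p[1], p[0]]  (shared by both ports; total via pyGetD, exact under Pre_)
def pvSwap (p : List Int) : List Int :=
  [PySem.List.pyGetD p 1 0, PySem.List.pyGetD p 0 0]

-- ===== PORT A =====
-- P_Total[i].count(p) + P_Total[i].count([p[1],p[0]])  (the expression A repeats)
def pvCountA (P : List (List Int)) (p : List Int) : Int :=
  (PySem.List.count P p : Int) + (PySem.List.count P (pvSwap p) : Int)

-- A's support loop: append p if neither p nor its swap is already in P_Supp
def pvSuppA (Pi : List (List Int)) : List (List Int) :=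
  Pi.foldl (fun P_Supp p =>
    if !(P_Supp.contains p) && !(P_Supp.contains (pvSwap p)) then P_Supp ++ [p]
    else P_Supp) []

-- A's innermost loop computing d_k for the pair (i, j)
def pvDkA (Pi Pj : List (List Int)) : Int :=
  (pvSuppA Pi).foldl (fun d_k p =>
    if pvCountA Pi p > pvCountA Pj p then d_k - 2 * pvCountA Pj p
    else d_k - 2 * pvCountA Pi p)
    (PySem.List.len Pi + PySem.List.len Pj)

-- A's j-loop building the row d
def pvRowA (P_Total : List (List (List Int))) (Pi : List (List Int)) : List Int :=
  (PySem.List.pyRange 0 (PySem.List.len P_Total)).foldl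
    (fun d j => d ++ [pvDkA Pi (PySem.List.pyGetD P_Total j [])]) []

def getkRFmeasure_unrooted (P_Total : List (List (List Int))) : List (List Int) :=
  (PySem.List.pyRange 0 (PySem.List.len P_Total)).foldl
    (fun d_Total i => d_Total ++ [pvRowA P_Total (PySem.List.pyGetD P_Total i [])]) []

-- ===== PORT B =====
-- Source B: occ = [(tuple(p), j) for j, P in enumerate(P_Total) for p in P]
def pvOcc (P_Total : List (List (List Int))) : List (List Int × Int) :=
  (PySem.List.enumerate P_Total 0).flatMap (fun jP => jP.2.map (fun p => (p, jP.1)))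

-- Source B: postings.setdefault(key, []).append(j)  (= modify key [] (· ++ [j]))
def pvPostings (P_Total : List (List (List Int))) : PySem.Dict (List Int) (List Int) :=
  (pvOcc P_Total).foldl (fun d q => d.modify q.1 [] (fun l => l ++ [q.2])) PySem.Dict.empty

-- Source B: c = {}; for j in postings[t] + postings.get(s, []): c[j] = c.get(j, 0) + 1
-- (postings[t] always hits since p itself was indexed; ported total via getD)
def pvCdict (post : PySem.Dict (List Int) (List Int)) (p : List Int) : PySem.Dict Int Int :=
  (post.getD p [] ++ post.getD (pvSwap p) []).foldl
    (fun c j => c.insert j (c.getD j 0 + 1)) PySem.Dict.empty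

-- Source B's loop body over p in P: skip if seen, else add to kept and rewrite the whole row
def pvStepB (post : PySem.Dict (List Int) (List Int)) (i : Int)
    (st : PySem.Set (List Int) × List Int) (p : List Int) :
    PySem.Set (List Int) × List Int :=
  if PySem.Set.contains st.1 p || PySem.Set.contains st.1 (pvSwap p) then st
  else
    let c := pvCdict post p
    let a := c.getD i 0
    (PySem.Set.add st.1 p,
     (PySem.List.enumerate st.2 0).map (fun e => e.2 - (a + c.getD e.1 0 - |a - c.getD e.1 0|)))

-- Source B's row for list index i: row = [len(P)+len(Q) for Q in P_Total], then the p-loop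
def pvRowB (P_Total : List (List (List Int))) (post : PySem.Dict (List Int) (List Int))
    (i : Int) (P : List (List Int)) : List Int :=
  (P.foldl (pvStepB post i)
    (PySem.Set.empty, P_Total.map (fun Q => PySem.List.len P + PySem.List.len Q))).2

def getkRFmeasure_unrooted_alt (P_Total : List (List (List Int))) : List (List Int) :=
  let post := pvPostings P_Total
  (PySem.List.enumerate P_Total 0).foldl
    (fun D iP => D ++ [pvRowB P_Total post iP.1 iP.2]) []

-- ===== PRECONDITION & SPEC =====
-- Pre_ excludes exactly the inputs on which the Python A raises IndexError:
-- some bipartition p has fewer than 2 entries, so p[1] (or p[0]) fails.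
def Pre_getkRFmeasure_unrooted (P_Total : List (List (List Int))) : Prop :=
  ∀ P ∈ P_Total, ∀ p ∈ P, 2 ≤ p.length
instance (P_Total : List (List (List Int))) : Decidable (Pre_getkRFmeasure_unrooted P_Total) := by
  unfold Pre_getkRFmeasure_unrooted; infer_instance
def pvWitness_getkRFmeasure_unrooted : List (List (List Int)) :=
  [[[1, 2], [2, 3], [2, 1]], [[1, 2]], []]
def Spec_getkRFmeasure_unrooted (P_Total : List (List (List Int))) (out : List (List Int)) : Prop := out = getkRFmeasure_unrooted_alt P_Total
instance (P_Total : List (List (List Int))) (out : List (List Int)) : Decidable (Spec_getkRFmeasure_unrooted P_Total out) := by unfold Spec_getkRFmeasure_unrooted; infer_instance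

-- ===== CLAIM (what is proved, stated in full; the proofs are below) =====
def Claim_equal_getkRFmeasure_unrooted : Prop := ∀ (P_Total : List (List (List Int))), Dom_getkRFmeasure_unrooted P_Total → Pre_getkRFmeasure_unrooted P_Total → Spec_getkRFmeasure_unrooted P_Total (getkRFmeasure_unrooted P_Total)

-- ===== LEMMAS AND PROOFS =====

-- ---- A-side characterisation ----

-- A's if/else subtraction loop is init - 2 * Σ min
theorem foldl_sub_min (L : List (List Int)) (a b : List Int → Int) (init : Int) :
    L.foldl (fun d_k p => if a p > b p then d_k - 2 * b p else d_k - 2 * a p) init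
    = init - 2 * (L.map (fun p => min (a p) (b p))).sum := by
  induction L generalizing init with
  | nil => simp
  | cons p L ih =>
    simp only [List.foldl_cons, List.map_cons, List.sum_cons, ih]
    split_ifs <;> omega

theorem pvDkA_eq (Pi Pj : List (List Int)) :
    pvDkA Pi Pj = PySem.List.len Pi + PySem.List.len Pj
      - 2 * ((pvSuppA Pi).map (fun p => min (pvCountA Pi p) (pvCountA Pj p))).sum := by
  unfold pvDkA; rw [foldl_sub_min]

theorem pvRowA_eq (P_Total : List (List (List Int))) (Pi : List (List Int)) :
    pvRowA P_Total Pi = P_Total.map (pvDkA Pi) := by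
  unfold pvRowA
  rw [PySem.List.foldl_pyRange_pyGetD P_Total [] (fun d Pj => d ++ [pvDkA Pi Pj]) []
    (le_refl 0)]
  simp [← List.flatMap_def, ← List.map_eq_flatMap]

theorem portA_eq (P_Total : List (List (List Int))) :
    getkRFmeasure_unrooted P_Total = P_Total.map (fun Pi => P_Total.map (pvDkA Pi)) := by
  unfold getkRFmeasure_unrooted
  rw [PySem.List.foldl_pyRange_pyGetD P_Total []
    (fun d_Total Pi => d_Total ++ [pvRowA P_Total Pi]) [] (le_refl 0)]
  simp [pvRowA_eq, ← List.flatMap_def, ← List.map_eq_flatMap]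

-- ---- enumerate facts ----

theorem pv_enumerate_map {α β : Type} (f : α → β) (L : List α) (s : Int) :
    PySem.List.enumerate (L.map f) s
      = (PySem.List.enumerate L s).map (fun e => (e.1, f e.2)) := by
  induction L generalizing s with
  | nil => simp [PySem.List.enumerate_nil]
  | cons x L ih => simp [PySem.List.enumerate_cons, ih]

theorem pv_enumerate_enumerate {α : Type} (L : List α) (s : Int) :
    PySem.List.enumerate (PySem.List.enumerate L s) s
      = (PySem.List.enumerate L s).map (fun e => (e.1, e)) := by
  induction L generalizing s with
  | nil => simp [PySem.List.enumerate_nil]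
  | cons x L ih => simp [PySem.List.enumerate_cons, ih]

theorem pv_map_enumerate_snd {α β : Type} (f : α → β) (L : List α) (s : Int) :
    (PySem.List.enumerate L s).map (fun e => f e.2) = L.map f := by
  conv_rhs => rw [← PySem.List.map_snd_enumerate L s]
  rw [List.map_map]
  rfl

theorem pv_mem_enumerate {α : Type} (L : List α) (s : Int) (e : Int × α) (d : α)
    (he : e ∈ PySem.List.enumerate L s) :
    s ≤ e.1 ∧ e.1 < s + L.length ∧ L.getD (e.1 - s).toNat d = e.2 := by
  induction L generalizing s with
  | nil => simp [PySem.List.enumerate_nil] at he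
  | cons x L ih =>
    rw [PySem.List.enumerate_cons] at he
    rcases List.mem_cons.1 he with h | h
    · subst h
      refine ⟨le_refl _, by simp only [List.length_cons]; push_cast; omega, by simp⟩
    · obtain ⟨h1, h2, h3⟩ := ih (s + 1) h
      have hk : (e.1 - s).toNat = (e.1 - (s + 1)).toNat + 1 := by omega
      refine ⟨by omega, by simp only [List.length_cons]; push_cast; omega, ?_⟩
      rw [hk]
      simpa using h3

-- ---- the inverted index: postings, then the per-element count dict ----

-- the postings list of key t is the filtered projection of the occurrence list
theorem pvPostings_getD (P_Total : List (List (List Int))) (t : List Int) :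
    (pvPostings P_Total).getD t []
      = ((pvOcc P_Total).filter (fun q => q.1 == t)).map (·.2) := by
  unfold pvPostings
  rw [PySem.Dict.getD_foldl_modify_append]
  simp

-- counting an index j in the filtered occurrence list counts t in the j-th input list
theorem pv_occ_count (L : List (List (List Int))) (s : Int) (t : List Int) (j : Int) :
    ((((PySem.List.enumerate L s).flatMap
        (fun jP => jP.2.map (fun p => (p, jP.1)))).filter (fun q => q.1 == t)).map (·.2)).count j
      = if s ≤ j ∧ j < s + L.length then (L.getD (j - s).toNat []).count t else 0 := by
  induction L generalizing s with
  | nil => simp [PySem.List.enumerate_nil]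
  | cons P L ih =>
    rw [PySem.List.enumerate_cons]
    simp only [List.flatMap_cons, List.filter_append, List.map_append, List.count_append]
    have h1 : (((P.map (fun p => (p, s))).filter (fun q => q.1 == t)).map (·.2)).count j
        = if j = s then P.count t else 0 := by
      rw [List.filter_map, List.map_map]
      by_cases hj : j = s
      · subst hj
        simp [Function.comp_def, List.count_eq_countP, List.countP_eq_length_filter]
      · simp only [hj, if_false, List.count_eq_countP, List.countP_map]
        rw [List.countP_eq_zero]
        intro a _
        simp [Function.comp_def]
        omega
    rw [h1, ih (s + 1)]
    by_cases hj : j = s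
    · subst hj
      have hc1 : (j ≤ j ∧ j < j + ((P :: L).length : Int)) := by
        simp only [List.length_cons]; push_cast; omega
      have hc2 : ¬ (j + 1 ≤ j ∧ j < j + 1 + (L.length : Int)) := by omega
      simp only [hc1, if_true, hc2, if_false]
      simp
    · simp only [hj, if_false, Nat.zero_add]
      by_cases hc : (s + 1 ≤ j ∧ j < s + 1 + (L.length : Int))
      · have hc' : (s ≤ j ∧ j < s + ((P :: L).length : Int)) := by
          simp only [List.length_cons]; push_cast; omega
        simp only [hc, hc']
        have hk : (j - s).toNat = (j - (s + 1)).toNat + 1 := by omega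
        rw [hk]
        simp
      · rw [if_neg, if_neg]
        · simp only [List.length_cons]; push_cast; omega
        · omega

-- c.get(j, 0) from the count dict is A's symmetric count in the j-th list
theorem pvCdict_getD (P_Total : List (List (List Int))) (p : List Int) (j : Int)
    (h0 : 0 ≤ j) (hlt : j < P_Total.length) :
    (pvCdict (pvPostings P_Total) p).getD j 0 = pvCountA (P_Total.getD j.toNat []) p := by
  unfold pvCdict
  rw [PySem.Dict.foldl_insert_getD_add_one_eq_counter, PySem.Dict.getD_counter]
  rw [List.count_append, pvPostings_getD, pvPostings_getD]
  unfold pvOcc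
  rw [pv_occ_count, pv_occ_count]
  have hc : (0 ≤ j ∧ j < 0 + (P_Total.length : Int)) := by omega
  rw [if_pos hc, if_pos hc]
  unfold pvCountA
  push_cast
  simp [PySem.List.count_eq]

-- ---- the row loop invariant ----

theorem pv_two_min (a b : Int) : a + b - |a - b| = 2 * min a b := by
  rcases le_total a b with h | h
  · rw [abs_of_nonpos (by omega), min_eq_left h]; ring
  · rw [abs_of_nonneg (by omega), min_eq_right h]; ring

theorem pvRowB_aux (P_Total : List (List (List Int))) (Pi : List (List Int)) (i : Int)
    (hi : 0 ≤ i) (hilen : i < P_Total.length) (hPi : P_Total.getD i.toNat [] = Pi)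
    (G : List (List Int) → Int)
    (P : List (List Int)) (seen : PySem.Set (List Int)) (supp : List (List Int))
    (hseen : ∀ x, PySem.Set.contains seen x = supp.contains x)
    (row : List Int)
    (hrow : row = (PySem.List.enumerate P_Total 0).map
      (fun e => G e.2 - 2 * (supp.map (fun p => min (pvCountA Pi p) (pvCountA e.2 p))).sum)) :
    (P.foldl (pvStepB (pvPostings P_Total) i) (seen, row)).2
    = (PySem.List.enumerate P_Total 0).map
        (fun e => G e.2 - 2 * ((P.foldl (fun P_Supp p =>
            if !(P_Supp.contains p) && !(P_Supp.contains (pvSwap p)) then P_Supp ++ [p]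
            else P_Supp) supp).map
          (fun p => min (pvCountA Pi p) (pvCountA e.2 p))).sum) := by
  induction P generalizing seen supp row with
  | nil => simpa using hrow
  | cons p P ih =>
    simp only [List.foldl_cons]
    by_cases hc : (supp.contains p || supp.contains (pvSwap p)) = true
    · have hA : (!(supp.contains p) && !(supp.contains (pvSwap p))) = false := by
        revert hc; cases supp.contains p <;> cases supp.contains (pvSwap p) <;> simp
      rw [hA]
      have hB : pvStepB (pvPostings P_Total) i (seen, row) p = (seen, row) := by
        unfold pvStepB
        simp only [hseen, hc, if_true]
      rw [hB]
      simp only [Bool.false_eq_true, if_false]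
      exact ih seen supp hseen row hrow
    · have hA : (!(supp.contains p) && !(supp.contains (pvSwap p))) = true := by
        revert hc; cases supp.contains p <;> cases supp.contains (pvSwap p) <;> simp
      rw [hA]
      simp only [if_true]
      have hcond : (PySem.Set.contains seen p || PySem.Set.contains seen (pvSwap p)) = false := by
        rw [hseen, hseen]; revert hc; cases supp.contains p <;> simp
      have hB : pvStepB (pvPostings P_Total) i (seen, row) p
          = (PySem.Set.add seen p,
             (PySem.List.enumerate row 0).map (fun e =>
               e.2 - ((pvCdict (pvPostings P_Total) p).getD i 0 + (pvCdict (pvPostings P_Total) p).getD e.1 0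
                 - |(pvCdict (pvPostings P_Total) p).getD i 0 - (pvCdict (pvPostings P_Total) p).getD e.1 0|))) := by
        unfold pvStepB
        rw [hcond]
        simp
      rw [hB]
      -- new seen set still mirrors the new support list
      have hseen' : ∀ x, PySem.Set.contains (PySem.Set.add seen p) x = (supp ++ [p]).contains x := by
        intro x
        have hp : supp.contains p = false := by
          revert hc; cases supp.contains p <;> simp
        have hpseen : ¬ p ∈ seen := by
          have hx := hseen p
          rw [hp] at hx
          simpa [PySem.Set.contains] using hx
        have hx := hseen x
        simp only [PySem.Set.contains, PySem.Set.add] at hx ⊢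
        simp at hx
        simp [hpseen, hx, List.mem_append]
      -- the rewritten row is the supp ++ [p] row
      have hrow' : (PySem.List.enumerate row 0).map (fun e =>
            e.2 - ((pvCdict (pvPostings P_Total) p).getD i 0 + (pvCdict (pvPostings P_Total) p).getD e.1 0
              - |(pvCdict (pvPostings P_Total) p).getD i 0 - (pvCdict (pvPostings P_Total) p).getD e.1 0|))
          = (PySem.List.enumerate P_Total 0).map
            (fun e => G e.2 - 2 * (((supp ++ [p]).map (fun q => min (pvCountA Pi q) (pvCountA e.2 q))).sum)) := by
        rw [hrow, pv_enumerate_map, pv_enumerate_enumerate, List.map_map, List.map_map]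
        apply List.map_congr_left
        intro e he
        obtain ⟨h1, h2, h3⟩ := pv_mem_enumerate P_Total 0 e [] he
        have hde : (pvCdict (pvPostings P_Total) p).getD e.1 0 = pvCountA e.2 p := by
          rw [pvCdict_getD P_Total p e.1 (by omega) (by omega)]
          simp only [Int.sub_zero] at h3
          rw [h3]
        have hdi : (pvCdict (pvPostings P_Total) p).getD i 0 = pvCountA Pi p := by
          rw [pvCdict_getD P_Total p i hi hilen, hPi]
        simp only [Function.comp_def, hde, hdi]
        rw [pv_two_min]
        simp only [List.map_append, List.sum_append, List.map_cons, List.map_nil,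
          List.sum_cons, List.sum_nil]
        ring
      rw [hrow']
      exact ih (PySem.Set.add seen p) (supp ++ [p]) hseen' _ rfl

theorem pvRowB_eq (P_Total : List (List (List Int))) (i : Int) (Pi : List (List Int))
    (hi : 0 ≤ i) (hilen : i < P_Total.length) (hPi : P_Total.getD i.toNat [] = Pi) :
    pvRowB P_Total (pvPostings P_Total) i Pi = P_Total.map (pvDkA Pi) := by
  unfold pvRowB
  rw [pvRowB_aux P_Total Pi i hi hilen hPi
    (fun Q => PySem.List.len Pi + PySem.List.len Q) Pi PySem.Set.empty []
    (fun x => by simp [PySem.Set.contains, PySem.Set.empty]) _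
    (by rw [pv_map_enumerate_snd
        (fun Q => PySem.List.len Pi + PySem.List.len Q
          - 2 * (([] : List (List Int)).map (fun p => min (pvCountA Pi p) (pvCountA Q p))).sum)
        P_Total 0]
        simp)]
  have hs : List.foldl (fun P_Supp p =>
      if !(P_Supp.contains p) && !(P_Supp.contains (pvSwap p)) then P_Supp ++ [p]
      else P_Supp) [] Pi = pvSuppA Pi := rfl
  rw [hs, pv_map_enumerate_snd (fun Q => PySem.List.len Pi + PySem.List.len Q
    - 2 * ((pvSuppA Pi).map (fun p => min (pvCountA Pi p) (pvCountA Q p))).sum) P_Total 0]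
  exact List.map_congr_left (fun Q _ => by rw [pvDkA_eq])

-- ===== VERDICT (by name: the statement is the Claim_ definition above) =====
theorem getkRFmeasure_unrooted_spec : Claim_equal_getkRFmeasure_unrooted := by
  intro P_Total _ _
  unfold Spec_getkRFmeasure_unrooted getkRFmeasure_unrooted_alt
  rw [portA_eq]
  rw [PySem.List.foldl_append_singleton_eq_map]
  simp only [List.nil_append]
  rw [show (PySem.List.enumerate P_Total 0).map
      (fun iP => pvRowB P_Total (pvPostings P_Total) iP.1 iP.2)
    = (PySem.List.enumerate P_Total 0).map (fun iP => P_Total.map (pvDkA iP.2)) from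
    List.map_congr_left (fun e he => by
      obtain ⟨h1, h2, h3⟩ := pv_mem_enumerate P_Total 0 e [] he
      refine pvRowB_eq P_Total e.1 e.2 h1 (by omega) ?_
      simpa only [Int.sub_zero] using h3)]
  rw [pv_map_enumerate_snd (fun Pi => P_Total.map (pvDkA Pi)) P_Total 0]
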